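-- pv_equiv track=rewrite | github.com/Bietola/problems | codechef/ROBOGAME/python/main.py | solve
-- ===== SOURCE A (Python) =====
-- def todigit(c):
--     return int(ord(c) - ord('0'))
--
-- def solve(robofield):
--     ln = None
--     d = 0
--     for c in robofield:
--         if c == '.':
--             d += 1
--         else:
--             if ln != None:
--                 if d - todigit(c) <= ln:
--                     return "unsafe"
--             d = 0
--             ln = todigit(c)
--     return "safe"
-- ===== SOURCE B (Python) =====
-- def solve(robofield):
--     # Divide and conquer: each half reports (verdict, first robot, last robot)
--     # with absolute positions; combining checks the one boundary pair.
--     def rec(s, off):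
--         if len(s) == 0:
--             return (True, None, None)
--         if len(s) == 1:
--             c = s[0]
--             if c == '.':
--                 return (True, None, None)
--             r = (off, ord(c) - ord('0'))
--             return (True, r, r)
--         m = len(s) // 2
--         s1, f1, l1 = rec(s[:m], off)
--         s2, f2, l2 = rec(s[m:], off + m)
--         ok = s1 and s2
--         if l1 is not None and f2 is not None:
--             (i, vp), (j, vc) = l1, f2
--             if (j - i - 1) - vc <= vp:
--                 ok = False
--         first = f1 if f1 is not None else f2
--         last = l2 if l2 is not None else l1
--         return (ok, first, last)
--     return "safe" if rec(robofield, 0)[0] else "unsafe"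
-- ===== Notes on version B (the rewrite author's own statement) =====
-- stated objective: alternative
-- what changed: B is a divide-and-conquer: it recursively splits the string in half, each half returning (verdict, first robot, last robot) with absolute positions, and the combine step performs the single boundary-pair check, instead of A's left-to-right scan with a running dot counter and a last-value register.
import Mathlib
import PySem

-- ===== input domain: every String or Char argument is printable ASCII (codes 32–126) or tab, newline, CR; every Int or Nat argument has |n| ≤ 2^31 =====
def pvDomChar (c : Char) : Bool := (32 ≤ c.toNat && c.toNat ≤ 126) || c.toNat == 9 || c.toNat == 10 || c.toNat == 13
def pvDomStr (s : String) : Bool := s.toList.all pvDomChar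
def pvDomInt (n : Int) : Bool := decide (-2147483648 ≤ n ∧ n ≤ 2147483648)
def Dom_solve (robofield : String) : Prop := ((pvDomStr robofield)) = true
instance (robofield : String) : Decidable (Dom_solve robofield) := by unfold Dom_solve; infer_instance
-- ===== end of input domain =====

-- B replaces A's left-to-right scan with a divide-and-conquer over the string halves
-- (alternative decomposition, same result).

-- ===== PORT A =====
-- todigit(c) = ord(c) - ord('0')
def todigit (c : Char) : Int := (c.toNat : Int) - 48

-- the for-loop of A with state (ln, d); early `return "unsafe"` ends the recursion
def solveLoop : List Char → Option Int → Int → String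
  | [], _, _ => "safe"
  | c :: cs, ln, d =>
    if c = '.' then solveLoop cs ln (d + 1)
    else
      match ln with
      | some l => if d - todigit c ≤ l then "unsafe" else solveLoop cs (some (todigit c)) 0
      | none => solveLoop cs (some (todigit c)) 0

def solve (robofield : String) : String := solveLoop robofield.toList none 0

-- ===== PORT B =====
-- rec(s, off): returns (verdict, first robot, last robot), robots as (abs position, value).
-- Python's s[:m] / s[m:] with 0 ≤ m ≤ len(s) are exactly take/drop.
def brec (s : List Char) (off : Int) : Bool × Option (Int × Int) × Option (Int × Int) :=
  match s with
  | [] => (true, none, none)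
  | [c] =>
    if c = '.' then (true, none, none)
    else ((true, some (off, todigit c), some (off, todigit c)))
  | a :: b :: t =>
    let m := (a :: b :: t).length / 2
    let r1 := brec ((a :: b :: t).take m) off
    let r2 := brec ((a :: b :: t).drop m) (off + (m : Int))
    let ok := r1.1 && r2.1 &&
      (match r1.2.2, r2.2.1 with
       | some (i, vp), some (j, vc) => !decide ((j - i - 1) - vc ≤ vp)
       | _, _ => true)
    let first := match r1.2.1 with | some f => some f | none => r2.2.1
    let last := match r2.2.2 with | some l => some l | none => r1.2.2
    (ok, first, last)
termination_by s.length
decreasing_by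
  · simp only [List.length_take, List.length_cons]; omega
  · simp only [List.length_drop, List.length_cons]; omega

def solve_alt (robofield : String) : String :=
  if (brec robofield.toList 0).1 = true then "safe" else "unsafe"

-- ===== PRECONDITION & SPEC =====
def Spec_solve (robofield : String) (out : String) : Prop := out = solve_alt robofield
instance (robofield : String) (out : String) : Decidable (Spec_solve robofield out) := by unfold Spec_solve; infer_instance

-- ===== CLAIM (what is proved, stated in full; the proofs are below) =====
def Claim_equal_solve : Prop := ∀ (robofield : String), Dom_solve robofield → Spec_solve robofield (solve robofield)

-- ===== LEMMAS AND PROOFS =====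

-- enumerate from an Int index
def enumFrom (i : Int) : List Char → List (Int × Char)
  | [] => []
  | c :: cs => (i, c) :: enumFrom (i + 1) cs

-- the robots of a segment starting at absolute position off: (position, value)
def robots (off : Int) (s : List Char) : List (Int × Int) :=
  ((enumFrom off s).filter (fun x => x.2 ≠ '.')).map (fun x => (x.1, todigit x.2))

def chk (p q : Int × Int) : Bool := decide ((q.1 - p.1 - 1) - q.2 ≤ p.2)

-- does every consecutive pair of robots keep a safe distance?
def pairsOK : List (Int × Int) → Bool
  | p :: q :: rest => !chk p q && pairsOK (q :: rest)
  | _ => true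

-- A's loop after the last robot (p, v) was seen, with dot count base - p - 1
lemma loop_some (cs : List Char) : ∀ (base p : Int) (q : Char),
    solveLoop cs (some (todigit q)) (base - p - 1) =
      (if pairsOK ((p, todigit q) :: robots base cs) then "safe" else "unsafe") := by
  induction cs with
  | nil => intro base p q; simp [solveLoop, robots, enumFrom, pairsOK]
  | cons c cs ih =>
    intro base p q
    by_cases hc : c = '.'
    · subst hc
      simp only [solveLoop, robots, enumFrom, List.filter]
      have h1 : base - p - 1 + 1 = (base + 1) - p - 1 := by ring
      rw [h1]
      simpa [robots] using ih (base + 1) p q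
    · simp only [solveLoop, if_neg hc, robots, enumFrom, List.filter]
      have hf : (decide ¬ c = '.') = true := by simp [hc]
      simp only [hf, List.map]
      by_cases hle : base - p - 1 - todigit c ≤ todigit q
      · have : chk (p, todigit q) (base, todigit c) = true := by
          simp [chk]; linarith
        simp [pairsOK, this, hle]
      · have hchk : chk (p, todigit q) (base, todigit c) = false := by
          simp [chk]; linarith
        have h0 : (0 : Int) = (base + 1) - base - 1 := by ring
        simp only [if_neg hle, pairsOK, hchk]
        rw [h0]
        simpa [robots] using ih (base + 1) base c
  
-- A's loop before any robot is seen: the dot count is irrelevant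
lemma loop_none (cs : List Char) : ∀ (base d : Int),
    solveLoop cs none d = (if pairsOK (robots base cs) then "safe" else "unsafe") := by
  induction cs with
  | nil => intro base d; simp [solveLoop, robots, enumFrom, pairsOK]
  | cons c cs ih =>
    intro base d
    by_cases hc : c = '.'
    · subst hc
      simp only [solveLoop, robots, enumFrom, List.filter]
      simpa [robots] using ih (base + 1) (d + 1)
    · simp only [solveLoop, if_neg hc, robots, enumFrom, List.filter]
      have hf : (decide ¬ c = '.') = true := by simp [hc]
      simp only [hf, List.map]
      have h0 : (0 : Int) = (base + 1) - base - 1 := by ring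
      rw [h0]
      simpa [robots] using loop_some cs (base + 1) base c

lemma enumFrom_append (l1 l2 : List Char) : ∀ off,
    enumFrom off (l1 ++ l2) = enumFrom off l1 ++ enumFrom (off + l1.length) l2 := by
  induction l1 with
  | nil => intro off; simp [enumFrom]
  | cons c cs ih =>
    intro off
    simp only [List.cons_append, enumFrom, ih (off + 1), List.length_cons]
    have h : off + ((cs.length + 1 : Nat) : Int) = off + 1 + (cs.length : Int) := by
      push_cast; ring
    rw [h]

lemma robots_append (l1 l2 : List Char) (off : Int) :
    robots off (l1 ++ l2) = robots off l1 ++ robots (off + l1.length) l2 := by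
  simp [robots, enumFrom_append]

lemma pairsOK_append (l1 l2 : List (Int × Int)) :
    pairsOK (l1 ++ l2) = (pairsOK l1 && pairsOK l2 &&
      (match l1.getLast?, l2.head? with
       | some p, some q => !chk p q
       | _, _ => true)) := by
  induction l1 with
  | nil => cases l2 <;> simp [pairsOK]
  | cons p l1 ih =>
    cases l1 with
    | nil =>
      cases l2 with
      | nil => simp [pairsOK]
      | cons q rest => simp [pairsOK, Bool.and_comm]
    | cons q rest =>
      have ih' := ih
      simp only [List.cons_append] at ih'
      simp only [List.cons_append, pairsOK, ih', List.getLast?_cons_cons]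
      cases h : chk p q <;> simp [Bool.and_assoc]

-- the divide-and-conquer recursion computes (pairsOK, head?, getLast?) of the robot list
lemma brec_eq : ∀ (n : Nat) (s : List Char), s.length ≤ n → ∀ off,
    brec s off = (pairsOK (robots off s), (robots off s).head?, (robots off s).getLast?) := by
  intro n
  induction n with
  | zero =>
    intro s hs off
    have : s = [] := by cases s <;> simp_all
    subst this
    simp [brec, robots, enumFrom, pairsOK]
  | succ n ih =>
    intro s hs off
    match s with
    | [] => simp [brec, robots, enumFrom, pairsOK]
    | [c] =>
      by_cases hc : c = '.'
      · subst hc; simp [brec, robots, enumFrom, pairsOK]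
      · simp [brec, hc, robots, enumFrom, pairsOK]
    | a :: b :: t =>
      rw [brec]
      have hlen : (a :: b :: t).length = t.length + 2 := by simp
      set m := (a :: b :: t).length / 2 with hm
      have hm1 : 1 ≤ m := by omega
      have hmlt : m < (a :: b :: t).length := by omega
      have htake : ((a :: b :: t).take m).length = m := by
        simp [List.length_take]; omega
      have h1 : ((a :: b :: t).take m).length ≤ n := by omega
      have h2 : ((a :: b :: t).drop m).length ≤ n := by
        simp [List.length_drop]; omega
      rw [ih _ h1, ih _ h2]
      have hsplit : robots off (a :: b :: t) =
          robots off ((a :: b :: t).take m) ++ robots (off + (m : Int)) ((a :: b :: t).drop m) := by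
        have := robots_append ((a :: b :: t).take m) ((a :: b :: t).drop m) off
        rw [htake] at this
        simpa using this
      rw [hsplit, pairsOK_append]
      set R1 := robots off ((a :: b :: t).take m)
      set R2 := robots (off + (m : Int)) ((a :: b :: t).drop m)
      refine Prod.ext ?_ (Prod.ext ?_ ?_)
      · -- verdicts agree
        simp only
        congr 1
        cases hg : R1.getLast? with
        | none => cases hh : R2.head? <;> simp
        | some p => cases hh : R2.head? with
          | none => simp
          | some q =>
            cases p; cases q
            simp [chk]
      · -- first robot
        simp only [List.head?_append]
        cases h : R1.head? <;> simp [Option.or]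
      · -- last robot
        simp only [List.getLast?_append]
        cases h : R2.getLast? <;> simp [Option.or]

-- ===== VERDICT (by name: the statement is the Claim_ definition above) =====
theorem solve_spec : Claim_equal_solve := by
  intro s _
  unfold Spec_solve solve solve_alt
  rw [loop_none s.toList 0 0, brec_eq s.toList.length s.toList le_rfl 0]
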